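-- pv_equiv track=rewrite | github.com/suzejka/shelter | tmp.py | check_and_replace_color
-- ===== SOURCE A (Python) =====
-- def check_and_replace_color(colors):
--     unique_colors = {}
--
--     for color in colors:
--         parts = color.split("/")
--         if len(parts) == 2:
--             reversed_color = "/".join(reversed(parts))
--             if reversed_color in unique_colors:
--                 unique_colors[color] = unique_colors[reversed_color]
--             else:
--                 unique_colors[color] = color
--         else:
--             unique_colors[color] = color
--
--     updated_colors = [unique_colors[color] for color in colors]
--     return updated_colors
-- ===== SOURCE B (Python) =====
-- def check_and_replace_color(colors):
--     def key(c):
--         parts = c.split("/")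
--         return tuple(sorted(parts)) if len(parts) == 2 else None
--
--     def canon(c):
--         k = key(c)
--         if k is None:
--             return c
--         # a match always exists: c itself has key k
--         return next(x for x in colors if key(x) == k)
--
--     return [canon(c) for c in colors]
-- ===== Notes on version B (the rewrite author's own statement) =====
-- stated objective: simpler
-- what changed: Drops the dict entirely: B defines the answer declaratively, mapping each color to the first element of the whole list whose unordered two-part key matches (a brute-force nested find), instead of A's stateful single pass that builds a dict of every orientation and then re-looks each color up.
import Mathlib
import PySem

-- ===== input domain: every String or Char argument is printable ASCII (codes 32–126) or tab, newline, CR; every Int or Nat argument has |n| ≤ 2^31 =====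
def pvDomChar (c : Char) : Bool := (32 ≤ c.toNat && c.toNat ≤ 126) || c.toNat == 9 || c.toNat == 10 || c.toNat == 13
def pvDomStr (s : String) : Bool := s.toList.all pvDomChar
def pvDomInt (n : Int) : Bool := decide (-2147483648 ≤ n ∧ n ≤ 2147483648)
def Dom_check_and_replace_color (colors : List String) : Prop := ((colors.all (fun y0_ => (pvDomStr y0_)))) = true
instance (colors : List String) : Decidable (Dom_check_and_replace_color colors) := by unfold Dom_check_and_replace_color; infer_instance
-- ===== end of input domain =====

-- B drops A's dict entirely: each output element is the first element of the whole list
-- sharing the same unordered two-part key (a declarative brute-force find): simpler.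

-- ===== PORT A =====
-- color.split("/"): the separator is the non-empty literal "/", so Python never raises;
-- PySem.Chars.splitOn is the exact sep ≠ "" form of str.split.
def check_and_replace_color (colors : List String) : List String :=
  let unique_colors : PySem.Dict String String :=
    colors.foldl (fun d color =>
      let parts : List String := (PySem.Chars.splitOn color.toList "/".toList).map String.ofList
      if parts.length = 2 then
        let reversed_color := PySem.Str.join "/" parts.reverse
        if d.contains reversed_color then
          d.insert color (d.getD reversed_color "")
        else
          d.insert color color
      else
        d.insert color color)
      PySem.Dict.empty
  colors.map (fun color => unique_colors.getD color "")

-- ===== PORT B =====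
-- Source B's key(c): tuple(sorted(parts)) for a two-part color, None otherwise.
def pvKeyB (c : String) : Option (String × String) :=
  match (PySem.Chars.splitOn c.toList "/".toList).map String.ofList with
  | [a, b] => some (if a ≤ b then (a, b) else (b, a))
  | _ => none

-- Source B's canon(c): the first x in colors with key(x) == k. The generator's `next` never
-- raises (c itself always matches), so `.getD c` is reached only vacuously.
def check_and_replace_color_alt (colors : List String) : List String :=
  colors.map (fun c =>
    match pvKeyB c with
    | none => c
    | some k => (colors.find? (fun x => pvKeyB x == some k)).getD c)

-- ===== PRECONDITION & SPEC =====
def Spec_check_and_replace_color (colors : List String) (out : List String) : Prop := out = check_and_replace_color_alt colors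
instance (colors : List String) (out : List String) : Decidable (Spec_check_and_replace_color colors out) := by unfold Spec_check_and_replace_color; infer_instance

-- ===== CLAIM (what is proved, stated in full; the proofs are below) =====
def Claim_equal_check_and_replace_color : Prop := ∀ (colors : List String), Dom_check_and_replace_color colors → Spec_check_and_replace_color colors (check_and_replace_color colors)

-- ===== LEMMAS AND PROOFS =====

-- model of splitOn on sep = ['/']
def sp (cs : List Char) : List (List Char) :=
  match cs with
  | [] => [[]]
  | c :: rest =>
    if c = '/' then [] :: sp rest
    else match sp rest with
      | p :: ps => (c :: p) :: ps
      | [] => [[c]]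

theorem sp_ne_nil (cs : List Char) : sp cs ≠ [] := by
  cases cs with
  | nil => simp [sp]
  | cons c rest =>
    simp only [sp]
    split
    · simp
    · split <;> simp

theorem go_eq' : ∀ (fuel : Nat) (cs cur : List Char) (acc : List (List Char)),
    cs.length < fuel →
    PySem.Chars.splitOn.go ['/'] fuel cs cur acc =
      acc.reverse ++ (match sp cs with
        | p :: ps => (cur.reverse ++ p) :: ps
        | [] => [cur.reverse]) := by
  intro fuel
  induction fuel with
  | zero => intro cs cur acc h; omega
  | succ n ih =>
    intro cs cur acc h
    cases cs with
    | nil => simp [PySem.Chars.splitOn.go, sp]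
    | cons c rest =>
      rw [PySem.Chars.splitOn.go]
      by_cases hc : c = '/'
      · subst hc
        have hp : List.isPrefixOf ['/'] ('/' :: rest) = true := by simp [List.isPrefixOf]
        simp only [hp, if_true, List.length_cons, List.length_nil, List.drop_succ_cons, List.drop_zero, Nat.zero_add] at *
        rw [ih rest [] (cur.reverse :: acc) (by simpa using Nat.lt_of_succ_lt_succ h)]
        simp only [sp, if_pos rfl]
        cases hsp : sp rest with
        | nil => exact absurd hsp (sp_ne_nil rest)
        | cons p ps => simp
      · have hp : List.isPrefixOf ['/'] (c :: rest) = false := by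
          simp [List.isPrefixOf, hc]
          intro hh; exact hc hh.symm
        simp only [hp, Bool.false_eq_true, if_false]
        rw [ih rest (c :: cur) acc (by simpa using Nat.lt_of_succ_lt_succ h)]
        simp only [sp, if_neg hc]
        cases hsp : sp rest with
        | nil => exact absurd hsp (sp_ne_nil rest)
        | cons p ps => simp

theorem splitOn_eq_sp (cs : List Char) : PySem.Chars.splitOn cs ['/'] = sp cs := by
  rw [PySem.Chars.splitOn, go_eq' (cs.length + 1) cs [] [] (by omega)]
  cases hsp : sp cs with
  | nil => exact absurd hsp (sp_ne_nil cs)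
  | cons p ps => simp

theorem sp_join (cs : List Char) : PySem.Chars.join ['/'] (sp cs) = cs := by
  induction cs with
  | nil => simp [sp, PySem.Chars.join, List.intercalate]
  | cons c rest ih =>
    simp only [sp]
    by_cases hc : c = '/'
    · subst hc
      simp only [if_pos rfl]
      cases hsp : sp rest with
      | nil => exact absurd hsp (sp_ne_nil rest)
      | cons p ps =>
        rw [hsp] at ih
        simp_all [PySem.Chars.join, List.intercalate]
    · simp only [if_neg hc]
      cases hsp : sp rest with
      | nil => exact absurd hsp (sp_ne_nil rest)
      | cons p ps =>
        rw [hsp] at ih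
        simp only [PySem.Chars.join, List.intercalate] at ih ⊢
        cases ps <;> simp_all [List.intersperse]

theorem sp_no_sep (cs : List Char) : ∀ p ∈ sp cs, '/' ∉ p := by
  induction cs with
  | nil => simp [sp]
  | cons c rest ih =>
    simp only [sp]
    by_cases hc : c = '/'
    · subst hc; simp only [if_pos rfl]
      intro p hp
      rcases List.mem_cons.mp hp with h | h
      · simp [h]
      · exact ih p h
    · simp only [if_neg hc]
      cases hsp : sp rest with
      | nil => exact absurd hsp (sp_ne_nil rest)
      | cons q qs =>
        rw [hsp] at ih
        intro p hp
        rcases List.mem_cons.mp hp with h | h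
        · subst h
          intro hm
          rcases List.mem_cons.mp hm with h | h
          · exact hc h.symm
          · exact ih q (by simp) h
        · exact ih p (by simp [h])

theorem sp_of_no_sep (a : List Char) (ha : '/' ∉ a) : sp a = [a] := by
  induction a with
  | nil => simp [sp]
  | cons c rest ih =>
    have hc : c ≠ '/' := fun h => ha (by simp [h])
    have hr : '/' ∉ rest := fun h => ha (by simp [h])
    simp [sp, hc, ih hr]

theorem sp_append (a b : List Char) (ha : '/' ∉ a) : sp (a ++ '/' :: b) = a :: sp b := by
  induction a with
  | nil => simp [sp]
  | cons c rest ih =>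
    have hc : c ≠ '/' := fun h => ha (by simp [h])
    have hr : '/' ∉ rest := fun h => ha (by simp [h])
    have hih := ih hr
    cases hsp : sp (rest ++ '/' :: b) with
    | nil => exact absurd hsp (sp_ne_nil _)
    | cons p ps =>
      rw [hsp] at hih
      injection hih with h1 h2
      simp [sp, hc, hsp, h1, h2]


-- ===== string level =====
def pvParts (c : String) : List String := (PySem.Chars.splitOn c.toList "/".toList).map String.ofList

theorem toList_pvParts (c : String) : (pvParts c).map String.toList = sp c.toList := by
  have h : ("/" : String).toList = ['/'] := rfl
  simp [pvParts, h, splitOn_eq_sp, List.map_map, Function.comp_def, String.toList_ofList]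

theorem pvParts_inj {x y : String} (h : pvParts x = pvParts y) : x = y := by
  have hx := sp_join x.toList
  have hy := sp_join y.toList
  rw [← toList_pvParts] at hx hy
  rw [h] at hx
  apply String.toList_injective
  rw [← hx, ← hy]

theorem pvParts_two {c : String} {a b : String} (h : pvParts c = [a, b]) :
    c.toList = a.toList ++ '/' :: b.toList ∧ '/' ∉ a.toList ∧ '/' ∉ b.toList := by
  have hj := sp_join c.toList
  have hs := sp_no_sep c.toList
  have ht : sp c.toList = [a.toList, b.toList] := by
    rw [← toList_pvParts, h]; rfl
  rw [ht] at hj hs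
  refine ⟨?_, hs a.toList (by simp), hs b.toList (by simp)⟩
  rw [← hj]
  simp [PySem.Chars.join, List.intercalate, List.intersperse]

def pvRev (c : String) : String := PySem.Str.join "/" (pvParts c).reverse

theorem pvParts_pvRev {c a b : String} (h : pvParts c = [a, b]) :
    pvParts (pvRev c) = [b, a] := by
  obtain ⟨hc, ha, hb⟩ := pvParts_two h
  have hrv : (pvRev c).toList = b.toList ++ '/' :: a.toList := by
    simp [pvRev, h, PySem.Str.join, PySem.Chars.join, String.toList_ofList,
      List.intercalate, List.intersperse]
  have hsp : sp (pvRev c).toList = [b.toList, a.toList] := by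
    rw [hrv, sp_append _ _ hb, sp_of_no_sep _ ha]
  have h2 : (pvParts (pvRev c)).map String.toList = [b.toList, a.toList] := by
    rw [toList_pvParts, hsp]
  cases hp : pvParts (pvRev c) with
  | nil => rw [hp] at h2; simp at h2
  | cons u t =>
    cases t with
    | nil => rw [hp] at h2; simp at h2
    | cons v t2 =>
      cases t2 with
      | nil =>
        rw [hp] at h2
        simp at h2
        obtain ⟨h3, h4⟩ := h2
        rw [String.toList_injective h3, String.toList_injective h4]
      | cons w t3 => rw [hp] at h2; simp at h2

def pvKey (c : String) : String × String :=
  match pvParts c with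
  | [a, b] => if a ≤ b then (a, b) else (b, a)
  | _ => (c, c)

def pvIs2 (c : String) : Bool := (pvParts c).length == 2

theorem pvIs2_iff {c : String} : pvIs2 c = true ↔ ∃ a b, pvParts c = [a, b] := by
  constructor
  · intro h
    simp [pvIs2] at h
    match hp : pvParts c with
    | [a, b] => exact ⟨a, b, rfl⟩
    | [] => rw [hp] at h; simp at h
    | [a] => rw [hp] at h; simp at h
    | a :: b :: d :: t => rw [hp] at h; simp at h
  · rintro ⟨a, b, h⟩; simp [pvIs2, h]

theorem pvKey_pvRev {c a b : String} (h : pvParts c = [a, b]) : pvKey (pvRev c) = pvKey c := by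
  rw [pvKey, pvKey, h, pvParts_pvRev h]
  dsimp only
  rcases le_total a b with hab | hab
  · by_cases he : b ≤ a
    · have : a = b := le_antisymm hab he
      subst this; simp
    · simp [hab, he]
  · by_cases he : a ≤ b
    · have : a = b := le_antisymm he hab
      subst this; simp
    · simp [hab, he]

theorem pvIs2_pvRev {c : String} (h : pvIs2 c = true) : pvIs2 (pvRev c) = true := by
  obtain ⟨a, b, hp⟩ := pvIs2_iff.mp h
  exact pvIs2_iff.mpr ⟨b, a, pvParts_pvRev hp⟩

-- the match predicate: x is 2-part with the same sorted key as c
def pvPred (c : String) : String → Bool := fun x => pvIs2 x && (pvKey x == pvKey c)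

theorem pvPred_self {c : String} (h : pvIs2 c = true) : pvPred c c = true := by
  simp [pvPred, h]

theorem pvPred_rev {c : String} (h : pvIs2 c = true) : pvPred c (pvRev c) = true := by
  obtain ⟨a, b, hp⟩ := pvIs2_iff.mp h
  simp [pvPred, pvIs2_pvRev h, pvKey_pvRev hp]

theorem pvPred_eq_of_key {c d : String} (h : pvKey c = pvKey d) : pvPred c = pvPred d := by
  funext x; simp [pvPred, h]

-- characterization: matches of c are exactly c and pvRev c
theorem pvPred_char {c x : String} (hc : pvIs2 c = true) (hx : pvPred c x = true) :
    x = c ∨ x = pvRev c := by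
  obtain ⟨a, b, hp⟩ := pvIs2_iff.mp hc
  simp only [pvPred, Bool.and_eq_true, beq_iff_eq] at hx
  obtain ⟨hx2, hk⟩ := hx
  obtain ⟨u, v, hup⟩ := pvIs2_iff.mp hx2
  rw [pvKey, pvKey, hup, hp] at hk
  dsimp only at hk
  have hrev : pvParts (pvRev c) = [b, a] := pvParts_pvRev hp
  have huv : pvParts x = [a, b] ∨ pvParts x = [b, a] := by
    split_ifs at hk <;> injection hk with k1 k2
    · left; rw [hup, k1, k2]
    · right; rw [hup, k1, k2]
    · right; rw [hup, k2, k1]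
    · left; rw [hup, k2, k1]
  rcases huv with h | h
  · left; exact pvParts_inj (h.trans hp.symm)
  · right; exact pvParts_inj (h.trans hrev.symm)

def canonF (l : List String) (c : String) : String :=
  if pvIs2 c then (l.find? (pvPred c)).getD c else c

theorem canonF_append {l : List String} {c : String} (hc : c ∈ l) (l2 : List String) :
    canonF (l ++ l2) c = canonF l c := by
  unfold canonF
  by_cases h2 : pvIs2 c = true
  · rw [if_pos h2, if_pos h2, List.find?_append]
    have hs : (l.find? (pvPred c)).isSome := List.find?_isSome.mpr ⟨c, hc, pvPred_self h2⟩
    obtain ⟨y, hy⟩ := Option.isSome_iff_exists.mp hs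
    rw [hy]; rfl
  · rw [if_neg h2, if_neg h2]

-- A's fold step (definitionally the lambda in the port)
def pvStepA (d : PySem.Dict String String) (color : String) : PySem.Dict String String :=
  let parts : List String := (PySem.Chars.splitOn color.toList "/".toList).map String.ofList
  if parts.length = 2 then
    let reversed_color := PySem.Str.join "/" parts.reverse
    if d.contains reversed_color then d.insert color (d.getD reversed_color "")
    else d.insert color color
  else d.insert color color

def InvA (l : List String) (d : PySem.Dict String String) : Prop :=
  (∀ c, d.contains c = decide (c ∈ l)) ∧ (∀ c ∈ l, d.getD c "" = canonF l c)

theorem parts_eq (color : String) :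
    (PySem.Chars.splitOn color.toList "/".toList).map String.ofList = pvParts color := rfl

theorem rev_eq (color : String) :
    PySem.Str.join "/" (pvParts color).reverse = pvRev color := rfl

theorem invA_step {l : List String} {d : PySem.Dict String String} {c0 : String}
    (h : InvA l d) : InvA (l ++ [c0]) (pvStepA d c0) := by
  obtain ⟨h1, h2⟩ := h
  have hv : ∃ v, pvStepA d c0 = d.insert c0 v ∧
      ((pvIs2 c0 = true → ((pvRev c0 ∈ l ∧ v = d.getD (pvRev c0) "") ∨ (pvRev c0 ∉ l ∧ v = c0)))
        ∧ (pvIs2 c0 = false → v = c0)) := by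
    unfold pvStepA
    dsimp only
    rw [parts_eq, rev_eq]
    by_cases hl : (pvParts c0).length = 2
    · have h2t : pvIs2 c0 = true := by simp [pvIs2, hl]
      rw [if_pos hl]
      by_cases hm : pvRev c0 ∈ l
      · refine ⟨d.getD (pvRev c0) "", by simp [h1, hm], fun _ => Or.inl ⟨hm, rfl⟩, by simp [h2t]⟩
      · refine ⟨c0, by simp [h1, hm], fun _ => Or.inr ⟨hm, rfl⟩, by simp [h2t]⟩
    · have h2f : pvIs2 c0 = false := by simp [pvIs2, hl]
      rw [if_neg hl]
      exact ⟨c0, rfl, fun ht => absurd ht (by simp [h2f]), fun _ => rfl⟩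
  obtain ⟨v, hstep, hv2, hvn⟩ := hv
  rw [hstep]
  constructor
  · intro c
    rw [PySem.Dict.contains_insert]
    by_cases hc : c = c0 <;> simp [hc, h1]
  · intro c hc
    by_cases hcc : c = c0
    · subst hcc
      rw [PySem.Dict.getD_insert_self]
      by_cases h2t : pvIs2 c = true
      · unfold canonF
        rw [if_pos h2t, List.find?_append]
        rcases hv2 h2t with ⟨hm, hveq⟩ | ⟨hm, hveq⟩
        · -- reversed color already seen: v is the canonical value of the reversed color
          obtain ⟨a, b, hab⟩ := pvIs2_iff.mp h2t
          have hsome : (l.find? (pvPred c)).isSome :=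
            List.find?_isSome.mpr ⟨pvRev c, hm, pvPred_rev h2t⟩
          obtain ⟨y, hy⟩ := Option.isSome_iff_exists.mp hsome
          have hpr : pvPred (pvRev c) = pvPred c := pvPred_eq_of_key (pvKey_pvRev hab)
          rw [hveq, h2 _ hm]
          unfold canonF
          rw [if_pos (pvIs2_pvRev h2t), hpr, hy]
          simp
        · -- reversed color not seen yet: the only match in l ++ [c] is c itself
          have hfind : (l ++ [c]).find? (pvPred c) = some c := by
            have hsome : ((l ++ [c]).find? (pvPred c)).isSome :=
              List.find?_isSome.mpr ⟨c, by simp, pvPred_self h2t⟩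
            obtain ⟨y, hy⟩ := Option.isSome_iff_exists.mp hsome
            have hpy := List.find?_some hy
            have hmy := List.mem_of_find?_eq_some hy
            rcases pvPred_char h2t hpy with he | he
            · rw [hy, he]
            · rcases List.mem_append.mp hmy with hin | hin
              · exact absurd (he ▸ hin) hm
              · simp at hin
                rw [hy, hin]
          rw [← List.find?_append, hfind, hveq]
          rfl
      · unfold canonF
        rw [if_neg h2t]
        rw [Bool.not_eq_true] at h2t
        exact hvn h2t
    · rw [PySem.Dict.getD_insert_of_ne d v "" hcc]
      have hcl : c ∈ l := by
        rcases List.mem_append.mp hc with h | h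
        · exact h
        · simp at h; exact absurd h hcc
      rw [h2 c hcl, canonF_append hcl]

theorem invA_fold : ∀ (l2 l1 : List String) (d : PySem.Dict String String),
    InvA l1 d → InvA (l1 ++ l2) (l2.foldl pvStepA d) := by
  intro l2
  induction l2 with
  | nil => intro l1 d h; simpa using h
  | cons c t ih =>
    intro l1 d h
    have := ih (l1 ++ [c]) (pvStepA d c) (invA_step h)
    simpa using this

theorem invA_colors (colors : List String) : InvA colors (colors.foldl pvStepA PySem.Dict.empty) := by
  have h0 : InvA [] PySem.Dict.empty := by
    constructor
    · intro c; simp [PySem.Dict.contains_empty]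
    · intro c hc; simp at hc
  simpa using invA_fold colors [] PySem.Dict.empty h0

theorem A_eq (colors : List String) :
    check_and_replace_color colors = colors.map (canonF colors) := by
  have : check_and_replace_color colors
      = colors.map (fun c => (colors.foldl pvStepA PySem.Dict.empty).getD c "") := rfl
  rw [this]
  exact List.map_congr_left (fun c hc => (invA_colors colors).2 c hc)

-- ===== B side =====
theorem pvKeyB_eq (c : String) : pvKeyB c = if pvIs2 c then some (pvKey c) else none := by
  unfold pvKeyB
  rw [parts_eq]
  match hp : pvParts c with
  | [a, b] =>
    have h2 : pvIs2 c = true := pvIs2_iff.mpr ⟨a, b, hp⟩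
    simp [h2, pvKey, hp]
  | [] =>
    have h2 : pvIs2 c = false := by simp [pvIs2, hp]
    simp [h2]
  | [a] =>
    have h2 : pvIs2 c = false := by simp [pvIs2, hp]
    simp [h2]
  | a :: b :: d :: t =>
    have h2 : pvIs2 c = false := by simp [pvIs2, hp]
    simp [h2]

theorem pvKeyB_pred (c : String) :
    (fun x => pvKeyB x == some (pvKey c)) = pvPred c := by
  funext x
  rw [pvKeyB_eq]
  by_cases h2 : pvIs2 x = true
  · simp [h2, pvPred]
  · simp at h2
    simp [h2, pvPred]

theorem B_eq (colors : List String) :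
    check_and_replace_color_alt colors = colors.map (canonF colors) := by
  unfold check_and_replace_color_alt
  apply List.map_congr_left
  intro c _
  rw [pvKeyB_eq]
  by_cases h2 : pvIs2 c = true
  · rw [if_pos h2]
    dsimp only
    rw [pvKeyB_pred c]
    unfold canonF
    rw [if_pos h2]
  · simp only [h2, Bool.false_eq_true, if_false]
    unfold canonF
    rw [if_neg h2]

-- ===== VERDICT (by name: the statement is the Claim_ definition above) =====
theorem check_and_replace_color_spec : Claim_equal_check_and_replace_color := by
  intro colors _
  unfold Spec_check_and_replace_color
  rw [A_eq, B_eq]
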